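-- pv_equiv track=rewrite | github.com/CesarChaMal/interview-patterns-24x | examples/python/fenwick_tree_examples.py | range_add_query
-- ===== SOURCE A (Python) =====
-- class FenwickTree:
--     def __init__(self, n):
--         self.n = n
--         self.tree = [0] * (n + 1)
--
--     def update(self, i, delta):
--         while i <= self.n:
--             self.tree[i] += delta
--             i += i & (-i)
--
--     def query(self, i):
--         result = 0
--         while i > 0:
--             result += self.tree[i]
--             i -= i & (-i)
--         return result
--
--     def range_query(self, l, r):
--         return self.query(r) - self.query(l - 1)
--
-- def range_add_query(length, updates):
--     bit = FenwickTree(length)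
--
--     for left, right, val in updates:
--         bit.update(left + 1, val)
--         if right + 2 <= length:
--             bit.update(right + 2, -val)
--
--     result = []
--     for i in range(length):
--         result.append(bit.query(i + 1))
--     return result
-- ===== SOURCE B (Python) =====
-- def range_add_query(length, updates):
--     diff = [0] * (length + 1)
--     for left, right, val in updates:
--         if left < length:
--             diff[left] += val
--         if right + 2 <= length:
--             diff[right + 1] -= val
--     result = []
--     total = 0
--     for d in diff[:length]:
--         total += d
--         result.append(total)
--     return result
-- ===== Notes on version B (the rewrite author's own statement) =====
-- stated objective: faster
-- what changed: Replaces the Fenwick tree (log-time update loops plus a log-time query loop per output position) with a difference array updated in O(1) per update and turned into the answer by a single prefix-sum pass.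
import Mathlib
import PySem

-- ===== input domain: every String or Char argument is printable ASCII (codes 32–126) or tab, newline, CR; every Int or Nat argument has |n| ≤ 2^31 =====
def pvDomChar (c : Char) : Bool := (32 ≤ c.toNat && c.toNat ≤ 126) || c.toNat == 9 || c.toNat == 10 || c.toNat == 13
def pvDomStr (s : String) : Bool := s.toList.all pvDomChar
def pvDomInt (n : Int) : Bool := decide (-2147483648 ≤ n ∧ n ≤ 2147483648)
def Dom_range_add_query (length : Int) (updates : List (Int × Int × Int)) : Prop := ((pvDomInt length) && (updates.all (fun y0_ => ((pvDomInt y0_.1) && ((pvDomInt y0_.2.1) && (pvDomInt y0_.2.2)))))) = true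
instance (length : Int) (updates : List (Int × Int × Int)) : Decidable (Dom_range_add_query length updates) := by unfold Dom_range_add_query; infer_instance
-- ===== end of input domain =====

-- B replaces A's Fenwick tree with a difference array and one prefix-sum pass (measured faster, asymptotically O(U+N) vs O((U+N) log N)).

-- ===== PORT A =====
-- 'i & (-i)' of the Python while-loops:
def fenLow (i : Int) : Int := PySem.Int.band i (-i)

-- FenwickTree.update: 'while i <= n: tree[i] += delta; i += i & (-i)'.
-- List accesses use set/getD at i.toNat: inside Pre_ every executed access has 1 ≤ i ≤ n, where this is
-- exactly Python's tree[i].  The Nat fuel only makes the while-loop total; the callers pass enough.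
def fenUpdate (n : Int) (tree : List Int) (i delta : Int) : Nat → List Int
  | 0 => tree
  | f + 1 =>
    if i ≤ n then
      fenUpdate n (tree.set i.toNat (tree.getD i.toNat 0 + delta)) (i + fenLow i) delta f
    else tree

-- FenwickTree.query: 'result = 0; while i > 0: result += tree[i]; i -= i & (-i)'.
def fenQuery (tree : List Int) (i : Int) : Nat → Int
  | 0 => 0
  | f + 1 =>
    if 0 < i then tree.getD i.toNat 0 + fenQuery tree (i - fenLow i) f
    else 0

-- body of A's first for-loop
def fenStep (length : Int) (t : List Int) (u : Int × Int × Int) : List Int :=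
  let t1 := fenUpdate length t (u.1 + 1) u.2.2 (length + 1).toNat
  if u.2.1 + 2 ≤ length then fenUpdate length t1 (u.2.1 + 2) (-u.2.2) (length + 1).toNat else t1

def range_add_query (length : Int) (updates : List (Int × Int × Int)) : List Int :=
  let tree := updates.foldl (fenStep length) (List.replicate (length + 1).toNat 0)
  (PySem.List.pyRange 0 length 1).map (fun i => fenQuery tree (i + 1) (i + 1).toNat)

-- ===== PORT B =====
-- body of B's first for-loop: 'if left < length: diff[left] += val; if right + 2 <= length: diff[right+1] -= val'
-- (indices via toNat: inside Pre_ every executed access has 0 ≤ index ≤ length-1, exactly Python's diff[·])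
def diffStep (length : Int) (d : List Int) (u : Int × Int × Int) : List Int :=
  let d1 := if u.1 < length then d.set u.1.toNat (d.getD u.1.toNat 0 + u.2.2) else d
  if u.2.1 + 2 ≤ length then d1.set (u.2.1 + 1).toNat (d1.getD (u.2.1 + 1).toNat 0 - u.2.2) else d1

def range_add_query_alt (length : Int) (updates : List (Int × Int × Int)) : List Int :=
  let diff := updates.foldl (diffStep length) (List.replicate (length + 1).toNat 0)
  ((PySem.List.slice diff none (some length)).foldl
      (fun (st : Int × List Int) d => (st.1 + d, st.2 ++ [st.1 + d])) (0, [])).2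

-- ===== PRECONDITION & SPEC =====
-- Pre_ is exactly the set of inputs where A's while-loops terminate without an IndexError: an update with
-- left+1 <= 0 (or a taken guard branch with right+2 <= 0) sends the Fenwick update loop to a non-positive
-- index, where Python loops forever (i & -i becomes 0) or raises IndexError; for negative length the
-- updates must miss the empty tree the same way.
def Pre_range_add_query (length : Int) (updates : List (Int × Int × Int)) : Prop :=
  ∀ u ∈ updates, (0 ≤ u.1 ∧ -1 ≤ u.2.1) ∨ (length < 0 ∧ length ≤ u.1 ∧ length - 1 ≤ u.2.1)
instance (length : Int) (updates : List (Int × Int × Int)) : Decidable (Pre_range_add_query length updates) := by unfold Pre_range_add_query; infer_instance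

def pvWitness_range_add_query : Int × (List (Int × Int × Int)) := (3, [(0, 1, 5), (2, 2, -1)])

def Spec_range_add_query (length : Int) (updates : List (Int × Int × Int)) (out : List Int) : Prop := out = range_add_query_alt length updates
instance (length : Int) (updates : List (Int × Int × Int)) (out : List Int) : Decidable (Spec_range_add_query length updates out) := by unfold Spec_range_add_query; infer_instance

-- ===== CLAIM (what is proved, stated in full; the proofs are below) =====
def Claim_equal_range_add_query : Prop := ∀ (length : Int) (updates : List (Int × Int × Int)), Dom_range_add_query length updates → Pre_range_add_query length updates → Spec_range_add_query length updates (range_add_query length updates)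

-- ===== LEMMAS AND PROOFS =====

-- the value both programs compute at position p (written with A's shifted indices)
def pvContrib (length p : Int) (u : Int × Int × Int) : Int :=
  (if u.1 + 1 ≤ p + 1 then u.2.2 else 0) +
  (if u.2.1 + 2 ≤ length then (if u.2.1 + 2 ≤ p + 1 then -u.2.2 else 0) else 0)

-- `P is the lowest set bit of i`
def pvLowP (i P : Int) : Prop := ∃ k : Nat, P = 2 ^ k ∧ i % (2 * P) = P

theorem pvNatLow (m : Nat) (hm : 1 ≤ m) :
    ∃ k : Nat, m &&& (m - 1) = m - 2 ^ k ∧ 2 ^ k ≤ m ∧ m % 2 ^ (k + 1) = 2 ^ k := by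
  induction m using Nat.strong_induction_on with
  | _ m IH =>
    rcases Nat.even_or_odd m with ⟨b, hb⟩ | ⟨b, hb⟩
    · have hb1 : 1 ≤ b := by omega
      obtain ⟨k, h1, h2, h3⟩ := IH b (by omega) hb1
      have hpow : 2 ^ (k + 1) = 2 * 2 ^ k := by ring
      refine ⟨k + 1, ?_, by omega, ?_⟩
      · have he : m &&& (m - 1) = Nat.bit false b &&& Nat.bit true (b - 1) := by
          congr 1 <;> simp [Nat.bit] <;> omega
        rw [he, Nat.land_bit, h1]
        simp [Nat.bit]
        omega
      · have hdm := Nat.div_add_mod b (2 ^ (k + 1))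
        rw [h3] at hdm
        set q := b / 2 ^ (k + 1) with hq
        have hnl : 2 ^ (k + 2) * q = 2 * (2 ^ (k + 1) * q) := by ring
        have hm2 : m = 2 ^ (k + 2) * q + 2 ^ (k + 1) := by omega
        rw [hm2, Nat.mul_add_mod]
        refine Nat.mod_eq_of_lt ?_
        have h4 : (2:Nat) ^ (k+2) = 2 * 2 ^ (k+1) := by ring
        have h5 : 0 < (2:Nat) ^ (k+1) := Nat.two_pow_pos _
        omega
    · refine ⟨0, ?_, by omega, by omega⟩
      have he : m &&& (m - 1) = Nat.bit true b &&& Nat.bit false b := by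
        congr 1 <;> (simp [Nat.bit]; omega)
      rw [he, Nat.land_bit]
      simp [Nat.bit]
      omega

theorem pvFenLow_spec (i : Int) (hi : 0 < i) : pvLowP i (fenLow i) := by
  have hb : fenLow i = ((i.toNat - (i.toNat &&& (i.toNat - 1)) : Nat) : Int) := by
    unfold fenLow PySem.Int.band
    rw [if_pos (by omega), if_neg (by omega)]
    have h0 : (- -i - 1).toNat = i.toNat - 1 := by omega
    rw [h0]
  obtain ⟨k, h1, h2, h3⟩ := pvNatLow i.toNat (by omega)
  have hlow : i.toNat - (i.toNat &&& (i.toNat - 1)) = 2 ^ k := by omega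
  have hF : fenLow i = 2 ^ k := by rw [hb, hlow]; push_cast; ring
  refine ⟨k, hF, ?_⟩
  rw [hF]
  have h4 : ((i.toNat : Int)) % (((2^(k+1) : Nat)) : Int) = (((2^k : Nat)) : Int) := by
      exact_mod_cast congrArg (Nat.cast : Nat → Int) h3
  push_cast at h4
  have heq : ((i.toNat : Int)) = i := by omega
  rw [heq] at h4
  calc i % (2 * 2 ^ k) = i % (2 ^ (k+1)) := by ring_nf
    _ = 2 ^ k := h4


theorem pvQuot (x M r : Int) (h : x % M = r) : ∃ q : Int, x = M * q + r := by
  exact ⟨x / M, by rw [← h]; exact (Int.mul_ediv_add_emod x M).symm⟩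


theorem pvLowP_pos {i P : Int} (h : pvLowP i P) : 0 < P := by
  obtain ⟨k, hk, -⟩ := h; rw [hk]; positivity


theorem pvNNQ {P q : Int} (hP : 0 < P) (h : 0 < 2 * P * q + P) : 0 ≤ q := by
  by_contra hq
  have h1 : q ≤ -1 := by omega
  nlinarith


theorem pvLowP_le {i P : Int} (hi : 0 < i) (h : pvLowP i P) : P ≤ i := by
  have hP := pvLowP_pos h
  obtain ⟨k, hk, hmod⟩ := h
  obtain ⟨q, hq⟩ := pvQuot i (2 * P) P hmod
  have h0 : 0 ≤ q := pvNNQ hP (by omega)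
  nlinarith


theorem pvBitX {i j P Q : Int} (hP : pvLowP i P) (hQ : pvLowP j Q) (h1 : i + P ≤ j) (h2 : i ≤ j - Q) :
    i + P ≤ j - Q := by
  have hPp := pvLowP_pos hP
  have hQp := pvLowP_pos hQ
  obtain ⟨μ, hμ, hmodi⟩ := hP
  obtain ⟨ν, hν, hmodj⟩ := hQ
  obtain ⟨a, ha⟩ := pvQuot i (2 * P) P hmodi
  obtain ⟨b, hb⟩ := pvQuot j (2 * Q) Q hmodj
  rcases Nat.lt_or_ge ν μ with hc | hc
  · -- 2*Q divides P, hence divides i + P = 2*P*(a+1)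
    obtain ⟨s, hs⟩ : 2 * Q ∣ P := by
      rw [hμ, hν, show (2:Int) * 2 ^ ν = 2 ^ (ν + 1) by ring]
      exact pow_dvd_pow 2 (by omega)
    have hip : i + P = 2 * Q * (s * (2 * a + 2)) := by rw [ha, hs]; ring
    have hub : s * (2 * a + 2) ≤ b := by
      by_contra hx
      have hx1 : b + 1 ≤ s * (2 * a + 2) := by omega
      nlinarith
    nlinarith
  · -- 2*P divides m := j - Q = 2*Q*b
    obtain ⟨s, hs⟩ : P ∣ Q := hμ ▸ hν ▸ pow_dvd_pow 2 hc
    -- m = 2*P*(s*b)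
    have hm : j - Q = 2 * P * (s * b) := by rw [hb, hs]; ring
    have hw : 0 ≤ 2 * P * (s * b - a) - P := by nlinarith [hm, ha, h2]
    have hw1 : 1 ≤ s * b - a := by
      by_contra hx
      have : s * b - a ≤ 0 := by omega
      nlinarith
    nlinarith


theorem pvBitZ {i j P Q : Int} (hij : i < j)
    (hP : pvLowP i P) (hQ : pvLowP j Q) (h2 : j - Q < i) :
    i + P ≤ j := by
  have hPp := pvLowP_pos hP
  have hQp := pvLowP_pos hQ
  obtain ⟨μ, hμ, hmodi⟩ := hP
  obtain ⟨ν, hν, hmodj⟩ := hQ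
  obtain ⟨a, ha⟩ := pvQuot i (2 * P) P hmodi
  obtain ⟨b, hb⟩ := pvQuot j (2 * Q) Q hmodj
  rcases Nat.lt_or_ge μ ν with hc | hc
  · -- 2*P divides Q hence divides j
    obtain ⟨s, hs⟩ : 2 * P ∣ Q := by
      rw [hμ, hν, show (2:Int) * 2 ^ μ = 2 ^ (μ + 1) by ring]
      exact pow_dvd_pow 2 (by omega)
    have hjp : j = 2 * P * (s * (2 * b + 1)) := by rw [hb, hs]; ring
    have hca : a + 1 ≤ s * (2 * b + 1) := by
      by_contra hx
      have : s * (2 * b + 1) ≤ a := by omega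
      nlinarith
    nlinarith
  · -- Q divides i, and Q divides j - Q: forces i ≤ j - Q, contradiction
    exfalso
    obtain ⟨s, hs⟩ : Q ∣ P := hν ▸ hμ ▸ pow_dvd_pow 2 hc
    have hiq : i = Q * (s * (2 * a + 1)) := by rw [ha, hs]; ring
    have hgap : Q * (s * (2 * a + 1)) - Q * (2 * b) > 0 := by nlinarith [hb]
    have hst : 2 * b + 1 ≤ s * (2 * a + 1) := by
      by_contra hx
      have : s * (2 * a + 1) ≤ 2 * b := by omega
      nlinarith
    nlinarith

theorem getD_set (l : List Int) (i j : Nat) (v d : Int) :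
    (l.set i v).getD j d = if j = i ∧ i < l.length then v else l.getD j d := by
  simp only [List.getD_eq_getElem?_getD, List.getElem?_set]
  split_ifs with h1 h2 h3 <;> simp_all


theorem pvFenLow_pos (i : Int) (hi : 0 < i) : 0 < fenLow i := pvLowP_pos (pvFenLow_spec i hi)
theorem pvFenLow_le (i : Int) (hi : 0 < i) : fenLow i ≤ i := pvLowP_le hi (pvFenLow_spec i hi)

theorem pvFenUpdate_length (n : Int) (t : List Int) (i d : Int) (f : Nat) :
    (fenUpdate n t i d f).length = t.length := by
  induction f generalizing t i with
  | zero => rfl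
  | succ f IH =>
    unfold fenUpdate
    split
    · rw [IH]; simp
    · rfl

theorem pvFenUpdate_getD (n : Int) (f : Nat) (t : List Int) (i δ j : Int)
    (ht : t.length = (n + 1).toNat) (hi : 1 ≤ i) (hj : 1 ≤ j) (hjn : j ≤ n)
    (hf : (n + 1 - i).toNat ≤ f) :
    (fenUpdate n t i δ f).getD j.toNat 0
      = t.getD j.toNat 0 + (if i ≤ j ∧ j - fenLow j < i then δ else 0) := by
  induction f generalizing t i with
  | zero =>
    have hni : ¬ (i ≤ j) := by omega
    simp [fenUpdate, hni]
  | succ f IH =>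
    unfold fenUpdate
    split
    · rename_i hin
      have hlipos := pvFenLow_pos i (by omega)
      have hljpos := pvFenLow_pos j (by omega)
      have hjlen : j.toNat < t.length := by omega
      have hilen : i.toNat < t.length := by omega
      rw [IH _ _ (by simpa using ht) (by omega) (by omega), getD_set]
      have hLi := pvFenLow_spec i (by omega)
      have hLj := pvFenLow_spec j (by omega)
      by_cases hji : j = i
      · subst hji
        have hc1 : ¬ (j + fenLow j ≤ j ∧ j - fenLow j < j + fenLow j) := by omega
        have hc2 : (j ≤ j ∧ j - fenLow j < j) := by omega
        simp [hc2, hilen]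
        intro h1 _
        omega
      · have hne : ¬ (j.toNat = i.toNat ∧ i.toNat < t.length) := by
          rintro ⟨h, -⟩; exact hji (by omega)
        rw [if_neg hne]
        have hiff : (i + fenLow i ≤ j ∧ j - fenLow j < i + fenLow i)
            ↔ (i ≤ j ∧ j - fenLow j < i) := by
          constructor
          · rintro ⟨ha, hb⟩
            refine ⟨by omega, ?_⟩
            by_contra hile
            have := pvBitX hLi hLj ha (by omega)
            omega
          · rintro ⟨ha, hb⟩
            have hij : i < j := lt_of_le_of_ne ha (fun h => hji h.symm)
            exact ⟨pvBitZ hij hLi hLj hb, by omega⟩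
        simp only [hiff]
    · rename_i hin
      have hni : ¬ (i ≤ j) := by omega
      simp [hni]

theorem pvFenQuery_fenUpdate (n : Int) (g : Nat) (t : List Int) (i δ j : Int) (f : Nat)
    (ht : t.length = (n + 1).toNat) (hi : 1 ≤ i) (hj0 : 0 ≤ j) (hjn : j ≤ n)
    (hg : j.toNat ≤ g) (hf : (n + 1 - i).toNat ≤ f) :
    fenQuery (fenUpdate n t i δ f) j g = fenQuery t j g + (if i ≤ j then δ else 0) := by
  induction g generalizing j with
  | zero =>
    have : ¬ (i ≤ j) := by omega
    simp [fenQuery, this]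
  | succ g IH =>
    unfold fenQuery
    by_cases hjp : 0 < j
    · rw [if_pos hjp, if_pos hjp]
      have hlj := pvFenLow_pos j hjp
      have hle := pvFenLow_le j hjp
      rw [pvFenUpdate_getD n f t i δ j ht hi (by omega) hjn hf]
      rw [IH (j - fenLow j) (by omega) (by omega) (by omega)]
      have hj' : j - fenLow j ≤ j - 1 := by omega
      by_cases hij : i ≤ j - fenLow j
      · have h1 : ¬ (i ≤ j ∧ j - fenLow j < i) := by omega
        have h2 : i ≤ j := by omega
        simp only [if_neg h1, if_pos hij, if_pos h2]
        ring
      · simp only [if_neg hij]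
        by_cases h2 : i ≤ j
        · have h1 : i ≤ j ∧ j - fenLow j < i := ⟨h2, by omega⟩
          simp only [if_pos h1, if_pos h2]
          ring
        · have h1 : ¬ (i ≤ j ∧ j - fenLow j < i) := by omega
          simp only [if_neg h1, if_neg h2]
          ring
    · rw [if_neg hjp, if_neg hjp]
      have : ¬ (i ≤ j) := by omega
      simp [this]

theorem pvFenQuery_zero (m : Nat) (j : Int) (g : Nat) :
    fenQuery (List.replicate m 0) j g = 0 := by
  induction g generalizing j with
  | zero => rfl
  | succ g IH =>
    unfold fenQuery
    split
    · rw [IH]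
      simp [List.getD_eq_getElem?_getD, List.getElem?_replicate]
      split <;> simp
    · rfl

theorem pvFenStep_length (length : Int) (t : List Int) (u : Int × Int × Int) :
    (fenStep length t u).length = t.length := by
  unfold fenStep
  split <;> simp [pvFenUpdate_length]

theorem pvQuery_foldl (length : Int) (us : List (Int × Int × Int)) (t : List Int)
    (ht : t.length = (length + 1).toNat)
    (hPre : ∀ u ∈ us, 0 ≤ u.1 ∧ -1 ≤ u.2.1) (p : Int) (h0p : 0 ≤ p) (hp : p < length) :
    fenQuery (us.foldl (fenStep length) t) (p + 1) (p + 1).toNat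
      = fenQuery t (p + 1) (p + 1).toNat + (us.map (pvContrib length p)).sum := by
  induction us generalizing t with
  | nil => simp
  | cons u us IH =>
    simp only [List.foldl_cons, List.map_cons, List.sum_cons]
    rw [IH (fenStep length t u) (by rw [pvFenStep_length, ht]) (fun v hv => hPre v (by simp [hv]))]
    have hstep : fenQuery (fenStep length t u) (p + 1) (p + 1).toNat
        = fenQuery t (p + 1) (p + 1).toNat + pvContrib length p u := by
      obtain ⟨hu1, hu2⟩ := hPre u (by simp)
      unfold fenStep pvContrib
      have hfuel : (length + 1 - (u.1 + 1)).toNat ≤ (length + 1).toNat := by omega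
      have h1 := pvFenQuery_fenUpdate length (p+1).toNat t (u.1 + 1) u.2.2 (p + 1)
          ((length + 1).toNat) ht (by omega) (by omega) (by omega) (le_refl _) hfuel
      split
      · rename_i hg
        have hfuel2 : (length + 1 - (u.2.1 + 2)).toNat ≤ (length + 1).toNat := by omega
        have h2 := pvFenQuery_fenUpdate length (p+1).toNat
            (fenUpdate length t (u.1 + 1) u.2.2 (length + 1).toNat) (u.2.1 + 2) (-u.2.2) (p + 1)
            ((length + 1).toNat) (by rw [pvFenUpdate_length, ht]) (by omega) (by omega) (by omega) (le_refl _) hfuel2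
        rw [h2, h1]
        ring
      · rename_i hg
        rw [h1]
        ring
    rw [hstep]
    ring

theorem pvA_char (length : Int) (updates : List (Int × Int × Int))
    (hPre : ∀ u ∈ updates, 0 ≤ u.1 ∧ -1 ≤ u.2.1) :
    range_add_query length updates
      = (PySem.List.pyRange 0 length 1).map (fun p => (updates.map (pvContrib length p)).sum) := by
  unfold range_add_query
  refine List.map_congr_left (fun p hp => ?_)
  rw [PySem.List.mem_pyRange_one] at hp
  rw [pvQuery_foldl length updates _ (by simp) hPre p hp.1 hp.2, pvFenQuery_zero]
  ring

-- ---- B side ----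

def pvPoint (length x : Int) (u : Int × Int × Int) : Int :=
  (if u.1 < length ∧ x = u.1 then u.2.2 else 0) +
  (if u.2.1 + 2 ≤ length ∧ x = u.2.1 + 1 then -u.2.2 else 0)

theorem pvDiffStep_length (length : Int) (d : List Int) (u : Int × Int × Int) :
    (diffStep length d u).length = d.length := by
  unfold diffStep
  split <;> split <;> simp

theorem getD_set_eq (l : List Int) (i : Nat) (v d : Int) (h : i < l.length) :
    (l.set i v).getD i d = v := by
  rw [getD_set]; simp [h]

theorem getD_set_ne (l : List Int) (i j : Nat) (v d : Int) (h : j ≠ i) :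
    (l.set i v).getD j d = l.getD j d := by
  rw [getD_set]; simp [h]


theorem pvDiffStep_getD (length : Int) (d : List Int) (u : Int × Int × Int) (x : Int)
    (hd : d.length = (length + 1).toNat) (hu1 : 0 ≤ u.1) (hu2 : -1 ≤ u.2.1)
    (hx : 0 ≤ x) (hxl : x ≤ length) :
    (diffStep length d u).getD x.toNat 0 = d.getD x.toNat 0 + pvPoint length x u := by
  unfold diffStep pvPoint
  split
  · rename_i hl
    have hA : u.1.toNat < d.length := by omega
    split
    · rename_i hg
      have hB : (u.2.1 + 1).toNat < d.length := by omega
      have hB1 : (u.2.1 + 1).toNat < (d.set u.1.toNat (d.getD u.1.toNat 0 + u.2.2)).length := by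
        simpa using hB
      by_cases e2 : x = u.1
      · by_cases e1 : x = u.2.1 + 1
        · rw [show x.toNat = (u.2.1 + 1).toNat by omega, getD_set_eq _ _ _ _ hB1,
            show (u.2.1 + 1).toNat = u.1.toNat by omega, getD_set_eq _ _ _ _ hA,
            if_pos ⟨hl, e2⟩, if_pos ⟨hg, e1⟩]
          ring
        · rw [getD_set_ne _ _ _ _ _ (show x.toNat ≠ (u.2.1 + 1).toNat by omega),
            show x.toNat = u.1.toNat by omega, getD_set_eq _ _ _ _ hA,
            if_pos ⟨hl, e2⟩, if_neg (by tauto)]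
          ring
      · by_cases e1 : x = u.2.1 + 1
        · rw [show x.toNat = (u.2.1 + 1).toNat by omega, getD_set_eq _ _ _ _ hB1,
            getD_set_ne _ _ _ _ _ (show (u.2.1 + 1).toNat ≠ u.1.toNat by omega),
            if_neg (by tauto), if_pos ⟨hg, e1⟩]
          ring
        · rw [getD_set_ne _ _ _ _ _ (show x.toNat ≠ (u.2.1 + 1).toNat by omega),
            getD_set_ne _ _ _ _ _ (show x.toNat ≠ u.1.toNat by omega),
            if_neg (by tauto), if_neg (by tauto)]
          ring
    · rename_i hg
      by_cases e2 : x = u.1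
      · rw [show x.toNat = u.1.toNat by omega, getD_set_eq _ _ _ _ hA,
          if_pos ⟨hl, e2⟩, if_neg (by tauto)]
        ring
      · rw [getD_set_ne _ _ _ _ _ (show x.toNat ≠ u.1.toNat by omega),
          if_neg (by tauto), if_neg (by tauto)]
        ring
  · rename_i hl
    split
    · rename_i hg
      have hB : (u.2.1 + 1).toNat < d.length := by omega
      by_cases e1 : x = u.2.1 + 1
      · rw [show x.toNat = (u.2.1 + 1).toNat by omega, getD_set_eq _ _ _ _ hB,
          if_neg (by tauto), if_pos ⟨hg, e1⟩]
        ring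
      · rw [getD_set_ne _ _ _ _ _ (show x.toNat ≠ (u.2.1 + 1).toNat by omega),
          if_neg (by tauto), if_neg (by tauto)]
        ring
    · rename_i hg
      rw [if_neg (by tauto), if_neg (by tauto)]
      ring

theorem pvDiff_getD (length : Int) (us : List (Int × Int × Int)) (d : List Int) (x : Int)
    (hd : d.length = (length + 1).toNat)
    (hPre : ∀ u ∈ us, 0 ≤ u.1 ∧ -1 ≤ u.2.1) (hx : 0 ≤ x) (hxl : x ≤ length) :
    (us.foldl (diffStep length) d).getD x.toNat 0
      = d.getD x.toNat 0 + (us.map (pvPoint length x)).sum := by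
  induction us generalizing d with
  | nil => simp
  | cons u us IH =>
    simp only [List.foldl_cons, List.map_cons, List.sum_cons]
    obtain ⟨hu1, hu2⟩ := hPre u (by simp)
    rw [IH (diffStep length d u) (by rw [pvDiffStep_length, hd]) (fun v hv => hPre v (by simp [hv]))]
    rw [pvDiffStep_getD length d u x hd hu1 hu2 hx hxl]
    ring

theorem pvScan_snd (xs : List Int) (s0 : Int) (acc : List Int) :
    (xs.foldl (fun (st : Int × List Int) d => (st.1 + d, st.2 ++ [st.1 + d])) (s0, acc)).2
      = acc ++ (List.range xs.length).map (fun t => s0 + ((xs.take (t + 1)).sum)) := by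
  induction xs generalizing s0 acc with
  | nil => simp
  | cons x xs IH =>
    simp only [List.foldl_cons, List.length_cons]
    rw [IH]
    rw [List.range_succ_eq_map]
    simp [List.map_map, Function.comp_def, add_assoc]

theorem pvTake_sum (xs : List Int) (m : Nat) (hm : m ≤ xs.length) :
    (xs.take m).sum = ((List.range m).map (fun x => xs.getD x 0)).sum := by
  induction m with
  | zero => simp
  | succ m IH =>
    have hml : m < xs.length := by omega
    rw [List.range_succ, List.map_append, List.sum_append,
      ← List.take_concat_get (l := xs) (i := m) hml, List.concat_eq_append, List.sum_append,
      IH (by omega)]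
    simp [List.getD_eq_getElem?_getD, List.getElem?_eq_getElem hml]

theorem pvDiffFoldl_length (length : Int) (us : List (Int × Int × Int)) (d : List Int) :
    (us.foldl (diffStep length) d).length = d.length := by
  induction us generalizing d with
  | nil => rfl
  | cons u us IH => rw [List.foldl_cons, IH, pvDiffStep_length]

theorem pvSum_comm {α : Type} (us : List α) (m : Nat) (g : Nat → α → Int) :
    ((List.range m).map (fun x => (us.map (g x)).sum)).sum
      = (us.map (fun u => ((List.range m).map (fun x => g x u)).sum)).sum := by
  induction us with
  | nil => simp
  | cons u us IH =>
    simp only [List.map_cons, List.sum_cons, ← IH]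
    rw [← PySem.List.sum_map_add_int]

theorem pvSum_ind (m : Nat) (c v : Int) :
    ((List.range m).map (fun (x : Nat) => if (x : Int) = c then v else 0)).sum
      = if 0 ≤ c ∧ c < (m : Int) then v else 0 := by
  induction m with
  | zero => simp
  | succ m IH =>
    simp only [List.range_succ, List.map_append, List.sum_append, IH, List.map_cons,
      List.map_nil, List.sum_cons, List.sum_nil, add_zero]
    by_cases hc : (m : Int) = c
    · have h1 : ¬ (0 ≤ c ∧ c < (m : Int)) := by omega
      have h2 : 0 ≤ c ∧ c < ((m : Nat) + 1 : Int) := by omega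
      simp [hc, h2]
    · by_cases hin : 0 ≤ c ∧ c < (m : Int)
      · have h2 : 0 ≤ c ∧ c < ((m : Nat) + 1 : Int) := by omega
        simp [hc, hin, h2]
      · have h2 : ¬ (0 ≤ c ∧ c < ((m : Nat) + 1 : Int)) := by omega
        simp [hc, hin]
        intro h3 h4
        omega

theorem pvGetD_replicate (n x : Nat) : (List.replicate n (0:Int)).getD x 0 = 0 := by
  simp [List.getD_eq_getElem?_getD, List.getElem?_replicate]
  split <;> simp

theorem pvSlice_nil (b : Option Int) : PySem.List.slice ([] : List Int) none b = [] := by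
  cases b <;> simp [PySem.List.slice]

theorem pvPoint_sum (length : Int) (u : Int × Int × Int) (t : Nat)
    (hu1 : 0 ≤ u.1) (hu2 : -1 ≤ u.2.1) (ht : (t : Int) < length) :
    ((List.range (t + 1)).map (fun (x : Nat) => pvPoint length (x : Int) u)).sum
      = pvContrib length (t : Int) u := by
  unfold pvPoint pvContrib
  rw [PySem.List.sum_map_add_int]
  congr 1
  · by_cases hL : u.1 < length
    · simp only [hL, true_and]
      rw [pvSum_ind]
      by_cases hle : u.1 ≤ (t : Int)
      · rw [if_pos (by push_cast; omega), if_pos (by omega)]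
      · rw [if_neg (by push_cast; omega), if_neg (by omega)]
    · simp only [hL, false_and, if_false]
      rw [if_neg (by omega)]
      simp
  · by_cases hG : u.2.1 + 2 ≤ length
    · simp only [hG, true_and, if_pos trivial]
      rw [pvSum_ind]
      by_cases hle : u.2.1 + 2 ≤ (t : Int) + 1
      · rw [if_pos (by push_cast; omega), if_pos (by omega)]
      · rw [if_neg (by push_cast; omega), if_neg (by omega)]
    · simp only [hG, false_and, if_false]
      simp

theorem pvB_nil (length : Int) (updates : List (Int × Int × Int)) (hneg : length < 0) :
    range_add_query_alt length updates = [] := by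
  have hB : range_add_query_alt length updates
      = ((PySem.List.slice (updates.foldl (diffStep length) (List.replicate (length + 1).toNat 0))
            none (some length)).foldl
          (fun (st : Int × List Int) d => (st.1 + d, st.2 ++ [st.1 + d])) ((0:Int), ([] : List Int))).2 := rfl
  rw [hB]
  have hrep : List.replicate (length + 1).toNat (0:Int) = [] := by
    have h0 : (length + 1).toNat = 0 := by omega
    rw [h0]; rfl
  rw [hrep]
  have hfold : updates.foldl (diffStep length) [] = [] := by
    have hl := pvDiffFoldl_length length updates []
    simpa using List.eq_nil_of_length_eq_zero (by simpa using hl)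
  rw [hfold, pvSlice_nil]
  rfl

theorem pvB_char (length : Int) (updates : List (Int × Int × Int))
    (hPre : ∀ u ∈ updates, 0 ≤ u.1 ∧ -1 ≤ u.2.1) :
    range_add_query_alt length updates
      = (PySem.List.pyRange 0 length 1).map (fun p => (updates.map (pvContrib length p)).sum) := by
  have hB : range_add_query_alt length updates
      = ((PySem.List.slice (updates.foldl (diffStep length) (List.replicate (length + 1).toNat 0))
            none (some length)).foldl
          (fun (st : Int × List Int) d => (st.1 + d, st.2 ++ [st.1 + d])) ((0:Int), ([] : List Int))).2 := rfl
  rw [hB]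
  rcases Int.lt_or_le length 0 with hneg | hpos
  · rw [← hB, pvB_nil length updates hneg, PySem.List.pyRange_one_eq_nil (by omega)]
    rfl
  · set diff := updates.foldl (diffStep length) (List.replicate (length + 1).toNat 0) with hdiff
    have hlen : diff.length = (length + 1).toNat := by
      rw [hdiff, pvDiffFoldl_length]; simp
    rw [PySem.List.slice_to diff hpos, pvScan_snd, List.nil_append]
    have htl : (diff.take length.toNat).length = length.toNat := by
      simp [hlen]
    rw [htl, PySem.List.pyRange_one, List.map_map,
      show ((length : Int) - 0).toNat = length.toNat by omega]
    refine List.map_congr_left (fun t htm => ?_)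
    have htL : t < length.toNat := List.mem_range.mp htm
    simp only [Function.comp_apply, zero_add]
    rw [List.take_take, min_eq_left (by omega), pvTake_sum diff (t+1) (by omega)]
    have hculm : ∀ x ∈ List.range (t + 1),
        diff.getD x 0 = (updates.map (pvPoint length (x : Int))).sum := by
      intro x hx
      have hxr := List.mem_range.mp hx
      have h := pvDiff_getD length updates (List.replicate (length + 1).toNat 0) (x : Int)
        (by simp) hPre (by positivity) (by omega)
      rw [Int.toNat_natCast, pvGetD_replicate, ← hdiff] at h
      rw [h]
      ring
    rw [List.map_congr_left hculm,
      pvSum_comm updates (t + 1) (fun x u => pvPoint length (x : Int) u)]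
    refine congrArg List.sum (List.map_congr_left (fun u hu => ?_))
    exact pvPoint_sum length u t (hPre u hu).1 (hPre u hu).2 (by omega)

-- A returns nothing for a non-positive range
theorem pvA_nil (length : Int) (updates : List (Int × Int × Int)) (h : length ≤ 0) :
    range_add_query length updates = [] := by
  show (PySem.List.pyRange 0 length 1).map _ = []
  rw [PySem.List.pyRange_one_eq_nil (by omega)]
  rfl

-- ===== VERDICT (by name: the statement is the Claim_ definition above) =====
theorem range_add_query_spec : Claim_equal_range_add_query := by
  unfold Claim_equal_range_add_query
  intro length updates _ hPre
  unfold Spec_range_add_query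
  rcases Int.lt_or_le length 0 with hneg | hpos
  · rw [pvA_nil length updates (by omega), pvB_nil length updates hneg]
  · have hPre' : ∀ u ∈ updates, 0 ≤ u.1 ∧ -1 ≤ u.2.1 := by
      intro u hu
      rcases hPre u hu with h | h
      · exact h
      · omega
    rw [pvA_char length updates hPre', pvB_char length updates hPre']
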